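-- pv_equiv track=rewrite | github.com/skripnikkm10-byte/RgR_high_maths | task1.py | inverse_matrix_for_print
-- ===== SOURCE A (Python) =====
-- def det3x3(matrix):
--     x=[]
--     x.append(1*matrix[0][0]*matrix[1][1]*matrix[2][2])
--     x.append(1*matrix[0][1]*matrix[1][2]*matrix[2][0])
--     x.append(1*matrix[0][2]*matrix[1][0]*matrix[2][1])
--     x.append(-1*matrix[0][2]*matrix[1][1]*matrix[2][0])
--     x.append(-1*matrix[0][0]*matrix[1][2]*matrix[2][1])
--     x.append(-1*matrix[0][1]*matrix[1][0]*matrix[2][2])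
--     return sum(x)
--
-- def det2x2(matrix):
--     x=[]
--     x.append(1*matrix[0][0]*matrix[1][1])
--     x.append(-1*matrix[0][1]*matrix[1][0])
--     return sum(x)
--
-- def get_minor(matrix, row, col):
--     minor=[[0,0],[0,0]]
--     k=0
--     for i in range(3):
--         if i == row:
--             continue
--         x=0
--         for j in range(3):
--             if j == col:
--                 continue
--             minor[k][x]=matrix[i][j]
--             x += 1
--         k += 1
--     return minor
--
-- def minor_det_matrix(matrix):
--     x=[[0,0,0],[0,0,0],[0,0,0]]
--     for i in range(3):
--         for j in range(3):
--             x[i][j]=(-1)**(i+j)*det2x2(get_minor(matrix, i, j))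
--     return x
--
-- def matrix_transposition(matrix):
--     matrix_transponated=[[0,0,0],[0,0,0],[0,0,0]]
--     for i in range(3):
--         for j in range(3):
--             matrix_transponated[j][i]=matrix[i][j]
--     return matrix_transponated
--
-- def inverse_matrix_for_print(matrix):
--     det = det3x3(matrix)
--     if det==0:
--         return 'Обратной матрицы не существует.'
--     else:
--         in_matrix=matrix_transposition(minor_det_matrix(matrix))
--         for i in range(3):
--             for j in range(3):
--                 in_matrix[i][j]=f'{in_matrix[i][j]}/{det}'
--         return in_matrix
-- ===== SOURCE B (Python) =====
-- def inverse_matrix_for_print(matrix):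
--     a, b, c = matrix[0][0], matrix[0][1], matrix[0][2]
--     d, e, f = matrix[1][0], matrix[1][1], matrix[1][2]
--     g, h, i = matrix[2][0], matrix[2][1], matrix[2][2]
--     # cofactors C[i][j] with inlined 2x2 minor determinants
--     c00 = e * i - f * h
--     c01 = -(d * i - f * g)
--     c02 = d * h - e * g
--     c10 = -(b * i - c * h)
--     c11 = a * i - c * g
--     c12 = -(a * h - b * g)
--     c20 = b * f - c * e
--     c21 = -(a * f - c * d)
--     c22 = a * e - b * d
--     # determinant by first-row cofactor expansion (reuses the cofactors)
--     det = a * c00 + b * c01 + c * c02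
--     if det == 0:
--         return 'Обратной матрицы не существует.'
--     # transposed adjugate assembled directly: row i holds C[0][i], C[1][i], C[2][i]
--     return [[f'{n}/{det}' for n in row]
--             for row in ((c00, c10, c20), (c01, c11, c21), (c02, c12, c22))]
-- ===== Notes on version B (the rewrite author's own statement) =====
-- stated objective: simpler
-- what changed: Replaces the minor-extraction/det2x2/transposition helper pipeline and the independent 6-term Sarrus determinant by nine inlined cofactor expressions, a determinant obtained by first-row cofactor expansion reusing those cofactors, and the transposed adjugate assembled directly in the output literal.
import Mathlib
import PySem

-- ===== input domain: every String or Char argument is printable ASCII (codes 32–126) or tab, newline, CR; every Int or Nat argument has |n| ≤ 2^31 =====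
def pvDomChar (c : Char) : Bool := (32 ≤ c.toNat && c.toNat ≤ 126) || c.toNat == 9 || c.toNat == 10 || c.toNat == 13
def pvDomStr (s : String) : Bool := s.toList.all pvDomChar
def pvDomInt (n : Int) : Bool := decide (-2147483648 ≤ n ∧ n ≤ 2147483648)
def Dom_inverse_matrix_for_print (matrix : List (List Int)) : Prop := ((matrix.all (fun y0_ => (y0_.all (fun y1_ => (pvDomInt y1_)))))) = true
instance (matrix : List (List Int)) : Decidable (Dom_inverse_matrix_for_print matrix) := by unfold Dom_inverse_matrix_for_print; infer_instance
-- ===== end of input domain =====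

-- B simplifies A: inlined cofactors + first-row cofactor expansion + direct transposed-adjugate
-- assembly replace A's minor/det2x2/transposition helper pipeline and its Sarrus determinant.
-- Equivalence is about the RETURN value on Pre_ (3x3-indexable, nonsingular) inputs.

-- shared in-range index helper: matrix[i][j] for literal indices 0..2; exact under Pre_
-- (Python raises IndexError out of range, which Pre_ excludes)
def pvGet (m : List (List Int)) (i j : Nat) : Int := (m.getD i []).getD j 0

-- ===== PORT A =====
def det3x3A (m : List (List Int)) : Int :=
  ([ 1 * pvGet m 0 0 * pvGet m 1 1 * pvGet m 2 2,
     1 * pvGet m 0 1 * pvGet m 1 2 * pvGet m 2 0,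
     1 * pvGet m 0 2 * pvGet m 1 0 * pvGet m 2 1,
     -1 * pvGet m 0 2 * pvGet m 1 1 * pvGet m 2 0,
     -1 * pvGet m 0 0 * pvGet m 1 2 * pvGet m 2 1,
     -1 * pvGet m 0 1 * pvGet m 1 0 * pvGet m 2 2 ] : List Int).sum

def det2x2A (m : List (List Int)) : Int :=
  ([ 1 * pvGet m 0 0 * pvGet m 1 1,
     -1 * pvGet m 0 1 * pvGet m 1 0 ] : List Int).sum

-- the loop keeps rows i ≠ row and within them columns j ≠ col, in order
def get_minorA (m : List (List Int)) (row col : Nat) : List (List Int) :=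
  (([0, 1, 2] : List Nat).filter (fun i => i ≠ row)).map
    (fun i => (([0, 1, 2] : List Nat).filter (fun j => j ≠ col)).map (fun j => pvGet m i j))

def minor_det_matrixA (m : List (List Int)) : List (List Int) :=
  ([0, 1, 2] : List Nat).map (fun i =>
    ([0, 1, 2] : List Nat).map (fun j => (-1 : Int) ^ (i + j) * det2x2A (get_minorA m i j)))

-- t[j][i] = m[i][j], i.e. t[i][j] = m[j][i]
def matrix_transpositionA (m : List (List Int)) : List (List Int) :=
  ([0, 1, 2] : List Nat).map (fun i => ([0, 1, 2] : List Nat).map (fun j => pvGet m j i))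

def inverse_matrix_for_print (matrix : List (List Int)) : List (List String) :=
  let det := det3x3A matrix
  if det == 0 then
    []  -- Python returns a Russian message STRING here (not a list of lists); excluded by Pre_
  else
    (matrix_transpositionA (minor_det_matrixA matrix)).map
      (fun row => row.map (fun x => PySem.Int.toStr x ++ "/" ++ PySem.Int.toStr det))

-- ===== PORT B =====
def inverse_matrix_for_print_alt (matrix : List (List Int)) : List (List String) :=
  let a := pvGet matrix 0 0; let b := pvGet matrix 0 1; let c := pvGet matrix 0 2
  let d := pvGet matrix 1 0; let e := pvGet matrix 1 1; let f := pvGet matrix 1 2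
  let g := pvGet matrix 2 0; let h := pvGet matrix 2 1; let i := pvGet matrix 2 2
  let c00 := e * i - f * h
  let c01 := -(d * i - f * g)
  let c02 := d * h - e * g
  let c10 := -(b * i - c * h)
  let c11 := a * i - c * g
  let c12 := -(a * h - b * g)
  let c20 := b * f - c * e
  let c21 := -(a * f - c * d)
  let c22 := a * e - b * d
  let det := a * c00 + b * c01 + c * c02
  if det == 0 then
    []  -- Python returns the same Russian message string here; excluded by Pre_
  else
    ([[c00, c10, c20], [c01, c11, c21], [c02, c12, c22]] : List (List Int)).map
      (fun row => row.map (fun n => PySem.Int.toStr n ++ "/" ++ PySem.Int.toStr det))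

-- ===== PRECONDITION & SPEC =====
-- Pre_ excludes inputs where A raises IndexError (fewer than 3 rows, or a row among the first
-- three with fewer than 3 entries) and singular matrices, on which A returns a Russian message
-- string instead of a list of lists of strings (a value outside the declared return type).
def Pre_inverse_matrix_for_print (matrix : List (List Int)) : Prop :=
  3 ≤ matrix.length ∧
  3 ≤ (matrix.getD 0 []).length ∧
  3 ≤ (matrix.getD 1 []).length ∧
  3 ≤ (matrix.getD 2 []).length ∧
  pvGet matrix 0 0 * pvGet matrix 1 1 * pvGet matrix 2 2
    + pvGet matrix 0 1 * pvGet matrix 1 2 * pvGet matrix 2 0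
    + pvGet matrix 0 2 * pvGet matrix 1 0 * pvGet matrix 2 1
    - pvGet matrix 0 2 * pvGet matrix 1 1 * pvGet matrix 2 0
    - pvGet matrix 0 0 * pvGet matrix 1 2 * pvGet matrix 2 1
    - pvGet matrix 0 1 * pvGet matrix 1 0 * pvGet matrix 2 2 ≠ 0

instance (matrix : List (List Int)) : Decidable (Pre_inverse_matrix_for_print matrix) := by
  unfold Pre_inverse_matrix_for_print; infer_instance

def pvWitness_inverse_matrix_for_print : List (List Int) := [[1, 0, 0], [0, 1, 0], [0, 0, 1]]

def Spec_inverse_matrix_for_print (matrix : List (List Int)) (out : List (List String)) : Prop := out = inverse_matrix_for_print_alt matrix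
instance (matrix : List (List Int)) (out : List (List String)) : Decidable (Spec_inverse_matrix_for_print matrix out) := by unfold Spec_inverse_matrix_for_print; infer_instance

-- ===== CLAIM (what is proved, stated in full; the proofs are below) =====
def Claim_equal_inverse_matrix_for_print : Prop := ∀ (matrix : List (List Int)), Dom_inverse_matrix_for_print matrix → Pre_inverse_matrix_for_print matrix → Spec_inverse_matrix_for_print matrix (inverse_matrix_for_print matrix)

-- ===== LEMMAS AND PROOFS =====

-- ===== VERDICT (by name: the statement is the Claim_ definition above) =====
theorem inverse_matrix_for_print_spec : Claim_equal_inverse_matrix_for_print := by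
  intro m _ hpre
  obtain ⟨h0, h1, h2, h3, hdet⟩ := hpre
  rcases m with _ | ⟨r0, m⟩; · simp at h0
  rcases m with _ | ⟨r1, m⟩; · simp at h0
  rcases m with _ | ⟨r2, m⟩; · simp at h0
  simp only [List.getD_cons_succ, List.getD_cons_zero] at h1 h2 h3
  rcases r0 with _ | ⟨a, r0⟩; · simp at h1
  rcases r0 with _ | ⟨b, r0⟩; · simp at h1
  rcases r0 with _ | ⟨c, r0⟩; · simp at h1
  rcases r1 with _ | ⟨d, r1⟩; · simp at h2
  rcases r1 with _ | ⟨e, r1⟩; · simp at h2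
  rcases r1 with _ | ⟨f, r1⟩; · simp at h2
  rcases r2 with _ | ⟨g, r2⟩; · simp at h3
  rcases r2 with _ | ⟨h, r2⟩; · simp at h3
  rcases r2 with _ | ⟨i, r2⟩; · simp at h3
  simp only [pvGet, List.getD_cons_succ, List.getD_cons_zero] at hdet
  unfold Spec_inverse_matrix_for_print inverse_matrix_for_print inverse_matrix_for_print_alt
  simp only [det3x3A, det2x2A, get_minorA, minor_det_matrixA, matrix_transpositionA, pvGet,
    List.getD_cons_succ, List.getD_cons_zero, List.map, List.filter, List.sum_cons,
    List.sum_nil]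
  norm_num
  rw [if_neg (by intro hz; apply hdet; linarith), if_neg (by intro hz; apply hdet; linarith)]
  ring_nf
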